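-- pv_equiv track=rewrite | github.com/pawgajda/codewars-solutions | python/linux_history_and_exclamation_mark_command_series5.py | bang_contain_string
-- ===== SOURCE A (Python) =====
-- def bang_contain_string(s,history):
--     hist = history.split("\n")
--     hist = [i.strip() for i in hist]
--     # reverse the list because we look for most recent command
--     hist = list(reversed(hist))
--
--     for entry in hist:
--         if s in entry:
--             # parse found entry
--             return " ".join(entry.split(" ")[2:])
--
--     return f"!{s}: event not found"
-- ===== SOURCE B (Python) =====
-- def bang_contain_string(s, history):
--     found = None
--     for line in history.split("\n"):
--         entry = line.strip()
--         if s in entry: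
--             found = entry
--     if found is None:
--         return f"!{s}: event not found"
--     return " ".join(found.split(" ")[2:])
-- ===== Notes on version B (the rewrite author's own statement) =====
-- stated objective: alternative
-- what changed: Single forward pass keeping the last matching stripped line (no list materialisation, no reversal, no early return); rendering happens once after the loop.
import Mathlib
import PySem

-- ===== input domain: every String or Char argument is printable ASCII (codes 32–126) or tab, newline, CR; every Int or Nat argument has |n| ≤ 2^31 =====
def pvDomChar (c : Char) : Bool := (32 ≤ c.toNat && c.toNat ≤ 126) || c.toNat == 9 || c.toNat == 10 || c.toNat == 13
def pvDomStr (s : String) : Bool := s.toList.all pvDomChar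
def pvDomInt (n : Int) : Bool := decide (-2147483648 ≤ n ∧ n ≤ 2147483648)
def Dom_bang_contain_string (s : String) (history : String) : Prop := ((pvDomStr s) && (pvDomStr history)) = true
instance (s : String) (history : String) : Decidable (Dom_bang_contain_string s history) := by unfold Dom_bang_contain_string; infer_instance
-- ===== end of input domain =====

-- B replaces A's strip-all/reverse/first-hit scan by a single forward pass keeping the last match.

-- ===== PORT A =====
-- A's for-loop over the reversed stripped lines: first entry containing s wins.
def bangLoopA (s : String) : List String → String
  | [] => "!" ++ s ++ ": event not found"
  | entry :: rest =>
      if PySem.Str.isIn s entry then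
        PySem.Str.join " " (PySem.List.slice ((PySem.Str.split? entry " ").getD []) (some 2) none)
      else bangLoopA s rest

def bang_contain_string (s : String) (history : String) : String :=
  let hist := (PySem.Str.split? history "\n").getD []
  let hist := hist.map (fun i => PySem.Str.strip i)
  let hist := hist.reverse
  bangLoopA s hist

-- ===== PORT B =====
def bang_contain_string_alt (s : String) (history : String) : String :=
  let found : Option String :=
    ((PySem.Str.split? history "\n").getD []).foldl
      (fun acc line =>
        let entry := PySem.Str.strip line
        if PySem.Str.isIn s entry then some entry else acc) none
  match found with
  | none => "!" ++ s ++ ": event not found"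
  | some f => PySem.Str.join " " (PySem.List.slice ((PySem.Str.split? f " ").getD []) (some 2) none)

-- ===== PRECONDITION & SPEC =====
def Spec_bang_contain_string (s : String) (history : String) (out : String) : Prop := out = bang_contain_string_alt s history
instance (s : String) (history : String) (out : String) : Decidable (Spec_bang_contain_string s history out) := by unfold Spec_bang_contain_string; infer_instance

-- ===== CLAIM (what is proved, stated in full; the proofs are below) =====
def Claim_equal_bang_contain_string : Prop := ∀ (s : String) (history : String), Dom_bang_contain_string s history → Spec_bang_contain_string s history (bang_contain_string s history)

-- ===== LEMMAS AND PROOFS =====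

-- A's loop returns the rendering of the first matching entry (or the not-found string).
theorem bangLoopA_eq_find? (s : String) (m : List String) :
    bangLoopA s m = match m.find? (fun e => PySem.Str.isIn s e) with
      | some e => PySem.Str.join " " (PySem.List.slice ((PySem.Str.split? e " ").getD []) (some 2) none)
      | none => "!" ++ s ++ ": event not found" := by
  induction m with
  | nil => simp [bangLoopA]
  | cons e rest ih =>
      cases h : PySem.Str.isIn s e with
      | true => simp only [bangLoopA, List.find?, h, if_true]
      | false => simp only [bangLoopA, List.find?, h, Bool.false_eq_true, if_false, ih]

-- B's fold keeps the LAST match: it equals the FIRST match of the reversed list.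
theorem foldl_keep_last (p : String → Bool) (l : List String) (acc : Option String) :
    l.foldl (fun a e => if p e then some e else a) acc
      = match l.reverse.find? p with
        | some e => some e
        | none => acc := by
  induction l generalizing acc with
  | nil => simp
  | cons x xs ih =>
      simp only [List.foldl_cons, ih, List.reverse_cons, List.find?_append]
      cases hx : xs.reverse.find? p with
      | some e => simp
      | none =>
          by_cases h : p x <;> simp [List.find?, h]

-- ===== VERDICT (by name: the statement is the Claim_ definition above) =====
theorem bang_contain_string_spec : Claim_equal_bang_contain_string := by
  intro s history _
  unfold Spec_bang_contain_string bang_contain_string bang_contain_string_alt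
  simp only []
  rw [show (fun (acc : Option String) (line : String) =>
        let entry := PySem.Str.strip line
        if PySem.Str.isIn s entry then some entry else acc)
      = (fun acc line => if PySem.Str.isIn s (PySem.Str.strip line) then some (PySem.Str.strip line) else acc) from rfl]
  rw [show (((PySem.Str.split? history "\n").getD []).foldl
        (fun acc line => if PySem.Str.isIn s (PySem.Str.strip line) then some (PySem.Str.strip line) else acc) none)
      = ((((PySem.Str.split? history "\n").getD []).map (fun i => PySem.Str.strip i)).foldl
        (fun a e => if PySem.Str.isIn s e then some e else a) none) by
      rw [List.foldl_map]]
  rw [foldl_keep_last, bangLoopA_eq_find?]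
  cases ((((PySem.Str.split? history "\n").getD []).map (fun i => PySem.Str.strip i)).reverse.find?
      (fun e => PySem.Str.isIn s e)) <;> rfl
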